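-- pv_equiv track=rewrite | github.com/STAR-Laboratory/PRAC_TC_ISCA25 | TPRAC/champsim-ramulator2/champsim/configurations/ramulator2_configs/calc_rh_parameters.py | get_tprac_parameters
-- ===== SOURCE A (Python) =====
-- def get_tprac_parameters(tRH):
--     nrh_nbo_pairs = [
--         (128, 974),
--         (256, 1442),
--         (512, 2898),
--         (1024, 6070),
--         (2048, 13038),
--         (4096, 28638),
--     ]
--     for nrh, NBO in nrh_nbo_pairs:
--         if tRH <= nrh:
--             return NBO
--     return 32
-- ===== SOURCE B (Python) =====
-- import bisect
--
-- def get_tprac_parameters(tRH):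
--     thresholds = [128, 256, 512, 1024, 2048, 4096]
--     nbo_values = [974, 1442, 2898, 6070, 13038, 28638]
--     i = bisect.bisect_left(thresholds, tRH)
--     if i < len(thresholds):
--         return nbo_values[i]
--     return 32
-- ===== Notes on version B (the rewrite author's own statement) =====
-- stated objective: idiomatic
-- what changed: Replaces the linear scan over (threshold, NBO) pairs with a binary search (bisect_left) over a sorted thresholds list indexing a parallel NBO list.
import Mathlib
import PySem

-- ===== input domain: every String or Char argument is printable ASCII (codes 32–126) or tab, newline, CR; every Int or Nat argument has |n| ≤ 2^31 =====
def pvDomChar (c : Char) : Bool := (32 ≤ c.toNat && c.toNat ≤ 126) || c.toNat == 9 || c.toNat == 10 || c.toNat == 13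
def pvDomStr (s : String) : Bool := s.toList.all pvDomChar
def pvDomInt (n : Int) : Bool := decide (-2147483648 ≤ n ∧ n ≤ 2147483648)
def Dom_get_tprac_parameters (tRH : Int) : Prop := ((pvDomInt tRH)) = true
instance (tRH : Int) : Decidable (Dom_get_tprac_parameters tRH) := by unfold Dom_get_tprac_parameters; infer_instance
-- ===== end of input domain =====

-- ===== PORT A =====
-- header: B replaces A's linear scan with bisect_left over a sorted thresholds list (idiomatic, same result)
def get_tprac_parameters (tRH : Int) : Int :=
  let nrh_nbo_pairs : List (Int × Int) :=
    [(128, 974), (256, 1442), (512, 2898), (1024, 6070), (2048, 13038), (4096, 28638)]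
  (nrh_nbo_pairs.foldr (fun (p : Int × Int) (acc : Int) => if tRH ≤ p.1 then p.2 else acc) 32)

-- ===== PORT B =====
def get_tprac_parameters_alt (tRH : Int) : Int :=
  let thresholds : List Int := [128, 256, 512, 1024, 2048, 4096]
  let nbo_values : List Int := [974, 1442, 2898, 6070, 13038, 28638]
  let i := PySem.List.bisectLeft thresholds tRH
  if i < thresholds.length then nbo_values.getD i 0 else 32

-- ===== PRECONDITION & SPEC =====
def Spec_get_tprac_parameters (tRH : Int) (out : Int) : Prop := out = get_tprac_parameters_alt tRH
instance (tRH : Int) (out : Int) : Decidable (Spec_get_tprac_parameters tRH out) := by unfold Spec_get_tprac_parameters; infer_instance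

-- ===== CLAIM (what is proved, stated in full; the proofs are below) =====
def Claim_equal_get_tprac_parameters : Prop := ∀ (tRH : Int), Dom_get_tprac_parameters tRH → Spec_get_tprac_parameters tRH (get_tprac_parameters tRH)

-- ===== LEMMAS AND PROOFS =====

-- ===== VERDICT (by name: the statement is the Claim_ definition above) =====
theorem get_tprac_parameters_spec : Claim_equal_get_tprac_parameters := by
  intro tRH _
  unfold Spec_get_tprac_parameters get_tprac_parameters get_tprac_parameters_alt
  rcases Classical.em (tRH ≤ 128) with h0 | h0
  · simp [PySem.List.bisectLeft, PySem.List.bisectLeftLoop, show ¬ (128:Int) < tRH by omega, show ¬ (256:Int) < tRH by omega, show ¬ (512:Int) < tRH by omega, show ¬ (1024:Int) < tRH by omega, show ¬ (2048:Int) < tRH by omega, show ¬ (4096:Int) < tRH by omega, show tRH ≤ (128:Int) by omega, show tRH ≤ (256:Int) by omega, show tRH ≤ (512:Int) by omega, show tRH ≤ (1024:Int) by omega, show tRH ≤ (2048:Int) by omega, show tRH ≤ (4096:Int) by omega]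
  rcases Classical.em (tRH ≤ 256) with h1 | h1
  · simp [PySem.List.bisectLeft, PySem.List.bisectLeftLoop, show (128:Int) < tRH by omega, show ¬ (256:Int) < tRH by omega, show ¬ (512:Int) < tRH by omega, show ¬ (1024:Int) < tRH by omega, show ¬ (2048:Int) < tRH by omega, show ¬ (4096:Int) < tRH by omega, show ¬ tRH ≤ (128:Int) by omega, show tRH ≤ (256:Int) by omega, show tRH ≤ (512:Int) by omega, show tRH ≤ (1024:Int) by omega, show tRH ≤ (2048:Int) by omega, show tRH ≤ (4096:Int) by omega]
  rcases Classical.em (tRH ≤ 512) with h2 | h2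
  · simp [PySem.List.bisectLeft, PySem.List.bisectLeftLoop, show (128:Int) < tRH by omega, show (256:Int) < tRH by omega, show ¬ (512:Int) < tRH by omega, show ¬ (1024:Int) < tRH by omega, show ¬ (2048:Int) < tRH by omega, show ¬ (4096:Int) < tRH by omega, show ¬ tRH ≤ (128:Int) by omega, show ¬ tRH ≤ (256:Int) by omega, show tRH ≤ (512:Int) by omega, show tRH ≤ (1024:Int) by omega, show tRH ≤ (2048:Int) by omega, show tRH ≤ (4096:Int) by omega]
  rcases Classical.em (tRH ≤ 1024) with h3 | h3
  · simp [PySem.List.bisectLeft, PySem.List.bisectLeftLoop, show (128:Int) < tRH by omega, show (256:Int) < tRH by omega, show (512:Int) < tRH by omega, show ¬ (1024:Int) < tRH by omega, show ¬ (2048:Int) < tRH by omega, show ¬ (4096:Int) < tRH by omega, show ¬ tRH ≤ (128:Int) by omega, show ¬ tRH ≤ (256:Int) by omega, show ¬ tRH ≤ (512:Int) by omega, show tRH ≤ (1024:Int) by omega, show tRH ≤ (2048:Int) by omega, show tRH ≤ (4096:Int) by omega]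
  rcases Classical.em (tRH ≤ 2048) with h4 | h4
  · simp [PySem.List.bisectLeft, PySem.List.bisectLeftLoop, show (128:Int) < tRH by omega, show (256:Int) < tRH by omega, show (512:Int) < tRH by omega, show (1024:Int) < tRH by omega, show ¬ (2048:Int) < tRH by omega, show ¬ (4096:Int) < tRH by omega, show ¬ tRH ≤ (128:Int) by omega, show ¬ tRH ≤ (256:Int) by omega, show ¬ tRH ≤ (512:Int) by omega, show ¬ tRH ≤ (1024:Int) by omega, show tRH ≤ (2048:Int) by omega, show tRH ≤ (4096:Int) by omega]
  rcases Classical.em (tRH ≤ 4096) with h5 | h5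
  · simp [PySem.List.bisectLeft, PySem.List.bisectLeftLoop, show (128:Int) < tRH by omega, show (256:Int) < tRH by omega, show (512:Int) < tRH by omega, show (1024:Int) < tRH by omega, show (2048:Int) < tRH by omega, show ¬ (4096:Int) < tRH by omega, show ¬ tRH ≤ (128:Int) by omega, show ¬ tRH ≤ (256:Int) by omega, show ¬ tRH ≤ (512:Int) by omega, show ¬ tRH ≤ (1024:Int) by omega, show ¬ tRH ≤ (2048:Int) by omega, show tRH ≤ (4096:Int) by omega]
  · simp [PySem.List.bisectLeft, PySem.List.bisectLeftLoop, show (128:Int) < tRH by omega, show (256:Int) < tRH by omega, show (512:Int) < tRH by omega, show (1024:Int) < tRH by omega, show (2048:Int) < tRH by omega, show (4096:Int) < tRH by omega, show ¬ tRH ≤ (128:Int) by omega, show ¬ tRH ≤ (256:Int) by omega, show ¬ tRH ≤ (512:Int) by omega, show ¬ tRH ≤ (1024:Int) by omega, show ¬ tRH ≤ (2048:Int) by omega, show ¬ tRH ≤ (4096:Int) by omega]
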